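-- pv_equiv track=rewrite | github.com/w5678/leetcode-2021 | 1758. 生成交替二进制字符串的最少操作数/main.py | startWith1
-- ===== SOURCE A (Python) =====
-- def startWith1(s:str) -> int:
--     i,cnt=0,0
--     key=0
--     maps={
--         1:"1",
--         0:"0"
--     }
--     while i<len(s):
--         key = key^1
--         if s[i] == maps[key]:
--             pass
--         else:
--             cnt+=1
--         i+=1
--     return cnt
-- ===== SOURCE B (Python) =====
-- def startWith1(s: str) -> int:
--     even = s[::2]   # positions where the alternating pattern "1010..." expects '1'
--     odd = s[1::2]   # positions where it expects '0'
--     return (len(even) - even.count('1')) + (len(odd) - odd.count('0'))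
-- ===== Notes on version B (the rewrite author's own statement) =====
-- stated objective: simpler
-- what changed: Replaced the index/xor-state while-loop with a stateless decomposition: slice the string into even- and odd-index subsequences and return len-minus-count of the expected digit in each group.
import Mathlib
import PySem

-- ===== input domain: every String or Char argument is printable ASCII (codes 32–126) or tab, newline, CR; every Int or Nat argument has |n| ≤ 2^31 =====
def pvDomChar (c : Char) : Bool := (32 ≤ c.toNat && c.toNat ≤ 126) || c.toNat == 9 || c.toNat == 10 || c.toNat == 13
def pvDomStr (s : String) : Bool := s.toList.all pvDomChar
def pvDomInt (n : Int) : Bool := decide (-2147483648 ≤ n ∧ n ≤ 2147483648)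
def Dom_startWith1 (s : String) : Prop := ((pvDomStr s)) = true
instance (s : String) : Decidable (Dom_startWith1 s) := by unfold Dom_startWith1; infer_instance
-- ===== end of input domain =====

-- B replaces A's xor-state while-loop by parity slices with len-minus-count (simpler decomposition, same O(n) cost).

-- ===== PORT A =====
-- the dict literal {1: "1", 0: "0"} (values as the single chars they hold)
def startWith1Maps : PySem.Dict Int Char :=
  (PySem.Dict.empty.insert 1 '1').insert 0 '0'

-- the while-loop: state (remaining chars, key, cnt); key = key ^ 1 then compare s[i] to maps[key]
def startWith1Loop : List Char → Int → Int → Int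
  | [], _key, cnt => cnt
  | c :: rest, key, cnt =>
    let key' := PySem.Int.bxor key 1
    if c = PySem.Dict.getD startWith1Maps key' ' ' then startWith1Loop rest key' cnt
    else startWith1Loop rest key' (cnt + 1)

def startWith1 (s : String) : Int := startWith1Loop s.toList 0 0

-- ===== PORT B =====
def startWith1_alt (s : String) : Int :=
  let even := (PySem.Str.slice? s none none 2).getD ""    -- s[::2]
  let odd := (PySem.Str.slice? s (some 1) none 2).getD "" -- s[1::2]
  (PySem.Str.len even - (PySem.Str.count even "1" : Int))
    + (PySem.Str.len odd - (PySem.Str.count odd "0" : Int))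

-- ===== PRECONDITION & SPEC =====
def Spec_startWith1 (s : String) (out : Int) : Prop := out = startWith1_alt s
instance (s : String) (out : Int) : Decidable (Spec_startWith1 s out) := by unfold Spec_startWith1; infer_instance

-- ===== CLAIM (what is proved, stated in full; the proofs are below) =====
def Claim_equal_startWith1 : Prop := ∀ (s : String), Dom_startWith1 s → Spec_startWith1 s (startWith1 s)

-- ===== LEMMAS AND PROOFS =====

-- the even-index subsequence of a list
def pvEvens : List Char → List Char
  | [] => []
  | [a] => [a]
  | a :: _ :: t => a :: pvEvens t

theorem pvEvens_cons (a : Char) (t : List Char) : pvEvens (a :: t) = a :: pvEvens t.tail := by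
  cases t <;> rfl

-- s[::2] at the filterMap level
theorem pv_filterMap_two (l : List Char) :
    (List.range ((l.length + 1) / 2)).filterMap (fun k => l[2 * k]?) = pvEvens l := by
  induction l using pvEvens.induct with
  | case1 => simp [pvEvens]
  | case2 a => simp [pvEvens]
  | case3 a b t ih =>
    have h2 : ((a :: b :: t).length + 1) / 2 = (t.length + 1) / 2 + 1 := by
      simp only [List.length_cons]; omega
    rw [h2, List.range_succ_eq_map, List.filterMap_cons, pvEvens]
    simp only [Nat.mul_zero, List.getElem?_cons_zero, List.filterMap_map]
    have : ∀ k : Nat, (a :: b :: t)[2 * Nat.succ k]? = t[2 * k]? := by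
      intro k
      have : 2 * Nat.succ k = 2 * k + 1 + 1 := by omega
      rw [this, List.getElem?_cons_succ, List.getElem?_cons_succ]
    simp only [Function.comp_def, this, ih]

theorem pv_slice_evens (l : List Char) :
    PySem.List.slice? l none none 2 = some (pvEvens l) := by
  simp only [PySem.List.slice?, PySem.List.sliceIndices]
  norm_num
  have hc : (if 0 < l.length then (((l.length : Int) + 2 - 1) / 2).toNat else 0)
      = (l.length + 1) / 2 := by
    split <;> omega
  rw [hc]
  have hidx : ∀ k : Nat, l[(2 * (k : Int)).toNat]? = l[2 * k]? := by
    intro k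
    have h1 : (2 * (k : Int)).toNat = 2 * k := by omega
    rw [h1]
  rw [show (fun k : Nat => l[(2 * (k : Int)).toNat]?)
        = (fun k : Nat => l[2 * k]?) from funext hidx]
  rw [pv_filterMap_two]

theorem pv_slice_odds (l : List Char) :
    PySem.List.slice? l (some 1) none 2 = some (pvEvens l.tail) := by
  cases l with
  | nil => rfl
  | cons a t =>
    simp only [PySem.List.slice?, PySem.List.sliceIndices]
    norm_num
    have hc : (if 0 < t.length then (((t.length : Int) + 2 - 1) / 2).toNat else 0)
        = (t.length + 1) / 2 := by
      split <;> omega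
    rw [hc]
    have hidx : ∀ k : Nat, (a :: t)[((1 : Int) + 2 * (k : Int)).toNat]? = t[2 * k]? := by
      intro k
      have h1 : ((1 : Int) + 2 * (k : Int)).toNat = 2 * k + 1 := by omega
      rw [h1, List.getElem?_cons_succ]
    rw [show (fun k : Nat => (a :: t)[((1 : Int) + 2 * (k : Int)).toNat]?)
          = (fun k : Nat => t[2 * k]?) from funext hidx]
    rw [pv_filterMap_two]

-- str.count with a single-character needle is List.count
theorem pv_countgo_single (c : Char) (l : List Char) : ∀ (fuel acc : Nat), l.length ≤ fuel →
    PySem.Chars.count.go [c] fuel l acc = acc + l.count c := by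
  induction l with
  | nil =>
    intro fuel acc _
    cases fuel <;> simp [PySem.Chars.count.go]
  | cons h t ih =>
    intro fuel acc hf
    cases fuel with
    | zero => simp at hf
    | succ f =>
      rw [PySem.Chars.count.go]
      simp only [List.isPrefixOf, List.length_cons, List.length_nil, List.drop_succ_cons, List.drop_zero]
      by_cases hch : c == h
      · simp only [hch, Bool.true_and, if_pos]
        rw [ih f (acc + 1) (by simpa using Nat.lt_succ_iff.mp (Nat.lt_of_lt_of_le (Nat.lt_succ_self _) hf))]
        have : h = c := (beq_iff_eq.mp hch).symm
        simp [this]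
        omega
      · simp only [hch, Bool.false_and, if_neg, Bool.false_eq_true, not_false_eq_true]
        rw [ih f acc (by simpa using Nat.succ_le_succ_iff.mp hf)]
        have : ¬ h = c := fun e => hch (by simp [e])
        simp [this]

theorem pv_count_single (c : Char) (l : List Char) :
    PySem.Chars.count l [c] = l.count c := by
  rw [PySem.Chars.count]
  simpa using pv_countgo_single c l l.length 0 le_rfl

-- key facts about A's dict
theorem pv_maps_one : PySem.Dict.getD startWith1Maps 1 ' ' = '1' := by decide
theorem pv_maps_zero : PySem.Dict.getD startWith1Maps 0 ' ' = '0' := by decide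

-- the loop invariant: from key 0 the pattern expects '1' on even positions, from key 1 it expects '0'
theorem pv_loop_eval (l : List Char) : ∀ cnt : Int,
    (startWith1Loop l 0 cnt
      = cnt + (((pvEvens l).length : Int) - ((pvEvens l).count '1' : Int))
            + (((pvEvens l.tail).length : Int) - ((pvEvens l.tail).count '0' : Int)))
    ∧ (startWith1Loop l 1 cnt
      = cnt + (((pvEvens l).length : Int) - ((pvEvens l).count '0' : Int))
            + (((pvEvens l.tail).length : Int) - ((pvEvens l.tail).count '1' : Int))) := by
  induction l with
  | nil => intro cnt; simp [startWith1Loop, pvEvens]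
  | cons c t ih =>
    intro cnt
    have hx0 : PySem.Int.bxor 0 1 = 1 := by decide
    have hx1 : PySem.Int.bxor 1 1 = 0 := by decide
    constructor
    · show startWith1Loop (c :: t) 0 cnt = _
      rw [startWith1Loop]
      simp only [hx0, pv_maps_one, pvEvens_cons, List.tail_cons, List.count_cons,
        List.length_cons]
      by_cases hc : c = '1'
      · rw [if_pos hc, (ih cnt).2]
        simp [hc]
        ring
      · rw [if_neg hc, (ih (cnt + 1)).2]
        simp [hc]
        ring
    · show startWith1Loop (c :: t) 1 cnt = _
      rw [startWith1Loop]
      simp only [hx1, pv_maps_zero, pvEvens_cons, List.tail_cons, List.count_cons,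
        List.length_cons]
      by_cases hc : c = '0'
      · rw [if_pos hc, (ih cnt).1]
        simp [hc]
        ring
      · rw [if_neg hc, (ih (cnt + 1)).1]
        simp [hc]
        ring

theorem pv_alt_eval (s : String) :
    startWith1_alt s
      = (((pvEvens s.toList).length : Int) - ((pvEvens s.toList).count '1' : Int))
        + (((pvEvens s.toList.tail).length : Int) - ((pvEvens s.toList.tail).count '0' : Int)) := by
  unfold startWith1_alt
  simp only [PySem.Str.slice?, PySem.Chars.slice?, pv_slice_evens, pv_slice_odds,
    Option.map_some, Option.getD_some, PySem.Str.len, PySem.Str.count, String.toList_ofList]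
  rw [show ("1" : String).toList = ['1'] by rfl, show ("0" : String).toList = ['0'] by rfl]
  rw [pv_count_single, pv_count_single]

-- ===== VERDICT (by name: the statement is the Claim_ definition above) =====
theorem startWith1_spec : Claim_equal_startWith1 := by
  intro s _
  show startWith1 s = startWith1_alt s
  rw [pv_alt_eval, startWith1]
  have h := (pv_loop_eval s.toList 0).1
  rw [h]
  ring
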